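-- pv_equiv track=rewrite | github.com/yifeiZhang427/standOffice | office_subtree/compact_model/find_a_sample_storage_plmt.py | find_a_compact_plmt4two_col_cabinets_to_fill_storage
-- ===== SOURCE A (Python) =====
-- def find_a_compact_plmt4two_col_cabinets_to_fill_storage(cabinet_upbound, num_of_cabinets_per_col,
--                                                          cabinet_unit, storage_to_fill):
--     min_num = 0
--     while min_num <= cabinet_upbound:
--         if cabinet_unit * num_of_cabinets_per_col*2 * min_num >= storage_to_fill:
--             break
--         min_num += 1
--     return min_num
-- ===== SOURCE B (Python) =====
-- def find_a_compact_plmt4two_col_cabinets_to_fill_storage(cabinet_upbound, num_of_cabinets_per_col,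
--                                                          cabinet_unit, storage_to_fill):
--     # Closed-form: smallest count n in [0, cabinet_upbound] with factor*n >= storage_to_fill,
--     # else cabinet_upbound + 1 (and 0 when the loop range is empty or storage is non-positive).
--     if cabinet_upbound < 0 or storage_to_fill <= 0:
--         return 0
--     factor = cabinet_unit * num_of_cabinets_per_col * 2
--     if factor <= 0:
--         return cabinet_upbound + 1
--     need = -((-storage_to_fill) // factor)  # ceil(storage_to_fill / factor)
--     return min(need, cabinet_upbound + 1)
-- ===== Notes on version B (the rewrite author's own statement) =====
-- stated objective: faster
-- what changed: Replaced the O(cabinet_upbound) increment-and-test loop with an O(1) closed-form ceiling-division formula clamped at cabinet_upbound+1.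
import Mathlib
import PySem

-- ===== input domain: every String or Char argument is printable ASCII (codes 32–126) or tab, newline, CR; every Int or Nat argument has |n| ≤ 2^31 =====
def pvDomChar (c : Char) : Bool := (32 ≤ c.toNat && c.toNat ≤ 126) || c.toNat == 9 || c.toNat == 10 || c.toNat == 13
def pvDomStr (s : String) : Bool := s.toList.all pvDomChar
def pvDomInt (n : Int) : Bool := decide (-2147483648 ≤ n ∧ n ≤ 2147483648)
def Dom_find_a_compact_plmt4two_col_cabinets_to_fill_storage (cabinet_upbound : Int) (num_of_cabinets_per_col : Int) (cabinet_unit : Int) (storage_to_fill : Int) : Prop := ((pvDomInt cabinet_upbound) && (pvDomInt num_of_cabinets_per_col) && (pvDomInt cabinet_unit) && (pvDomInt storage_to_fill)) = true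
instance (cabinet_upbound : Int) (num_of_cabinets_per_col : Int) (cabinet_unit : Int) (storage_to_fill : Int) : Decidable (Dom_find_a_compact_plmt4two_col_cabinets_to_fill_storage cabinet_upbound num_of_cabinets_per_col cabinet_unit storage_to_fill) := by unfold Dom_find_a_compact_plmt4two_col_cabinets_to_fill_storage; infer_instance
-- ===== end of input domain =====

-- B replaces A's O(cabinet_upbound) increment loop with an O(1) ceiling-division closed form.
-- ===== PORT A =====
-- the 'while min_num <= cabinet_upbound' loop of A, step for step
def pvLoopA (cabinet_upbound num_of_cabinets_per_col cabinet_unit storage_to_fill min_num : Int) : Int :=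
  if h : min_num ≤ cabinet_upbound then
    if cabinet_unit * num_of_cabinets_per_col * 2 * min_num ≥ storage_to_fill then min_num
    else pvLoopA cabinet_upbound num_of_cabinets_per_col cabinet_unit storage_to_fill (min_num + 1)
  else min_num
termination_by (cabinet_upbound + 1 - min_num).toNat
decreasing_by omega

def find_a_compact_plmt4two_col_cabinets_to_fill_storage (cabinet_upbound : Int) (num_of_cabinets_per_col : Int) (cabinet_unit : Int) (storage_to_fill : Int) : Int :=
  pvLoopA cabinet_upbound num_of_cabinets_per_col cabinet_unit storage_to_fill 0

-- ===== PORT B =====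
def find_a_compact_plmt4two_col_cabinets_to_fill_storage_alt (cabinet_upbound : Int) (num_of_cabinets_per_col : Int) (cabinet_unit : Int) (storage_to_fill : Int) : Int :=
  if cabinet_upbound < 0 ∨ storage_to_fill ≤ 0 then 0
  else
    let factor := cabinet_unit * num_of_cabinets_per_col * 2
    if factor ≤ 0 then cabinet_upbound + 1
    else min (-(PySem.Int.floordiv (-storage_to_fill) factor)) (cabinet_upbound + 1)

-- ===== PRECONDITION & SPEC =====
def Spec_find_a_compact_plmt4two_col_cabinets_to_fill_storage (cabinet_upbound : Int) (num_of_cabinets_per_col : Int) (cabinet_unit : Int) (storage_to_fill : Int) (out : Int) : Prop := out = find_a_compact_plmt4two_col_cabinets_to_fill_storage_alt cabinet_upbound num_of_cabinets_per_col cabinet_unit storage_to_fill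
instance (cabinet_upbound : Int) (num_of_cabinets_per_col : Int) (cabinet_unit : Int) (storage_to_fill : Int) (out : Int) : Decidable (Spec_find_a_compact_plmt4two_col_cabinets_to_fill_storage cabinet_upbound num_of_cabinets_per_col cabinet_unit storage_to_fill out) := by unfold Spec_find_a_compact_plmt4two_col_cabinets_to_fill_storage; infer_instance

-- ===== CLAIM (what is proved, stated in full; the proofs are below) =====
def Claim_equal_find_a_compact_plmt4two_col_cabinets_to_fill_storage : Prop := ∀ (cabinet_upbound : Int) (num_of_cabinets_per_col : Int) (cabinet_unit : Int) (storage_to_fill : Int), Dom_find_a_compact_plmt4two_col_cabinets_to_fill_storage cabinet_upbound num_of_cabinets_per_col cabinet_unit storage_to_fill → Spec_find_a_compact_plmt4two_col_cabinets_to_fill_storage cabinet_upbound num_of_cabinets_per_col cabinet_unit storage_to_fill (find_a_compact_plmt4two_col_cabinets_to_fill_storage cabinet_upbound num_of_cabinets_per_col cabinet_unit storage_to_fill)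

-- ===== LEMMAS AND PROOFS =====

-- If no index in [0, ub] satisfies the test, the loop runs off the end and returns ub+1.
theorem pvLoop_miss (ub npc cu st : Int)
    (hall : ∀ k : Int, 0 ≤ k → k ≤ ub → cu * npc * 2 * k < st) :
    ∀ n : Int, 0 ≤ n → n ≤ ub + 1 → pvLoopA ub npc cu st n = ub + 1 := by
  intro n hn hnub
  generalize hd : (ub + 1 - n).toNat = d
  induction d generalizing n with
  | zero =>
      have : n = ub + 1 := by omega
      subst this
      rw [pvLoopA]
      simp
  | succ d ih =>
      have h1 : n ≤ ub := by omega
      have h2 : ¬ (cu * npc * 2 * n ≥ st) := not_le.mpr (hall _ hn h1)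
      rw [pvLoopA]
      simp only [h1, dif_pos, h2, if_false]
      exact ih (n + 1) (by omega) (by omega) (by omega)

theorem pvLoop_hit (ub npc cu st c : Int)
    (hc : cu * npc * 2 * c ≥ st) (hcub : c ≤ ub)
    (hmin : ∀ k : Int, 0 ≤ k → k < c → cu * npc * 2 * k < st) :
    ∀ n : Int, 0 ≤ n → n ≤ c → pvLoopA ub npc cu st n = c := by
  intro n hn hnc
  generalize hd : (c - n).toNat = d
  induction d generalizing n with
  | zero =>
      have : n = c := by omega
      subst this
      rw [pvLoopA]
      simp [le_trans hnc hcub, hc]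
  | succ d ih =>
      have hlt : n < c := by omega
      have h2 : ¬ (cu * npc * 2 * n ≥ st) := not_le.mpr (hmin _ hn hlt)
      rw [pvLoopA]
      simp only [show n ≤ ub by omega, dif_pos, h2, if_false]
      exact ih (n + 1) (by omega) (by omega) (by omega)

theorem pvMain (ub npc cu st : Int) :
    find_a_compact_plmt4two_col_cabinets_to_fill_storage ub npc cu st =
    find_a_compact_plmt4two_col_cabinets_to_fill_storage_alt ub npc cu st := by
  unfold find_a_compact_plmt4two_col_cabinets_to_fill_storage
    find_a_compact_plmt4two_col_cabinets_to_fill_storage_alt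
  by_cases hub : ub < 0
  · rw [pvLoopA]
    simp [hub, show ¬ (0 : Int) ≤ ub by omega]
  · by_cases hst : st ≤ 0
    · rw [pvLoopA]
      simp only [show (0:Int) ≤ ub by omega, dif_pos]
      have : cu * npc * 2 * 0 ≥ st := by simpa using hst
      simp [hub, hst]
    · -- st > 0, ub ≥ 0
      simp only [hub, hst, or_self, if_false]
      by_cases hf : cu * npc * 2 ≤ 0
      · have hall : ∀ k : Int, 0 ≤ k → k ≤ ub → cu * npc * 2 * k < st := by
          intro k hk _
          have : cu * npc * 2 * k ≤ 0 := mul_nonpos_of_nonpos_of_nonneg hf hk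
          omega
        rw [pvLoop_miss ub npc cu st hall 0 le_rfl (by omega)]
        simp [hf]
      · -- factor > 0
        rw [not_le] at hf
        set f := cu * npc * 2 with hfdef
        set c := -(PySem.Int.floordiv (-st) f) with hcdef
        have hbr := (PySem.Int.neg_floordiv_neg_eq_iff_of_pos (a := st) (b := f) (q := c) hf).mp rfl
        obtain ⟨hlo, hhi⟩ := hbr
        -- hlo : (c - 1) * f < st,  hhi : st ≤ c * f
        have hc1 : 1 ≤ c := by
          by_contra h
          rw [not_le] at h
          have : c * f ≤ 0 := mul_nonpos_of_nonpos_of_nonneg (by omega) (by omega)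
          omega
        have hmin : ∀ k : Int, 0 ≤ k → k < c → f * k < st := by
          intro k _ hkc
          have : k * f ≤ (c - 1) * f := by
            exact mul_le_mul_of_nonneg_right (by omega) (by omega)
          have := lt_of_le_of_lt this hlo
          linarith [this, mul_comm f k]
        by_cases hcub : c ≤ ub
        · rw [pvLoop_hit ub npc cu st c (by linarith [mul_comm c f]) hcub hmin 0 le_rfl (by omega)]
          simp [if_neg (not_le.mpr hf)]
          omega
        · have hall : ∀ k : Int, 0 ≤ k → k ≤ ub → f * k < st := by
            intro k hk hkub
            exact hmin k hk (by omega)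
          rw [pvLoop_miss ub npc cu st hall 0 le_rfl (by omega)]
          simp [if_neg (not_le.mpr hf)]
          omega

-- ===== VERDICT (by name: the statement is the Claim_ definition above) =====
theorem find_a_compact_plmt4two_col_cabinets_to_fill_storage_spec : Claim_equal_find_a_compact_plmt4two_col_cabinets_to_fill_storage := by
  intro ub npc cu st _
  unfold Spec_find_a_compact_plmt4two_col_cabinets_to_fill_storage
  exact pvMain ub npc cu st
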